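-- pv_equiv track=rewrite | github.com/RusuUrsu/fp | pythonProject4/ex6.py | domino_teilfolge
-- ===== SOURCE A (Python) =====
-- def domino_teilfolge(lista):
--     mx = 1
--
--     lg = 1
--
--     i_start = 0
--     for i in range(len(lista)-1):
--
--         if lista[i]%10 == lista[i+1]//10:
--             lg+=1
--         else:
--             if lg>mx:
--                 mx = lg
--                 i_start = i-lg+1
--             lg = 1
--
--     if lg > mx:
--         mx = lg
--         i_start = len(lista) - lg
--     lg = 0
--
--     return lista[i_start:i_start+mx]
-- ===== SOURCE B (Python) =====
-- def domino_teilfolge(lista):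
--     n = len(lista)
--     starts = [0] + [i + 1 for i in range(n - 1) if lista[i] % 10 != lista[i + 1] // 10]
--     ranges = list(zip(starts, starts[1:] + [n]))
--     s, e = max(ranges, key=lambda r: r[1] - r[0])
--     return lista[s:e]
-- ===== Notes on version B (the rewrite author's own statement) =====
-- stated objective: alternative
-- what changed: A's single stateful scan (running length, best-so-far with a post-loop fixup) is replaced by a two-phase build-then-select: compute the break indices, zip them into the list of maximal segment (start,end) ranges, pick the first longest with max(key=length) and slice.
import Mathlib
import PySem

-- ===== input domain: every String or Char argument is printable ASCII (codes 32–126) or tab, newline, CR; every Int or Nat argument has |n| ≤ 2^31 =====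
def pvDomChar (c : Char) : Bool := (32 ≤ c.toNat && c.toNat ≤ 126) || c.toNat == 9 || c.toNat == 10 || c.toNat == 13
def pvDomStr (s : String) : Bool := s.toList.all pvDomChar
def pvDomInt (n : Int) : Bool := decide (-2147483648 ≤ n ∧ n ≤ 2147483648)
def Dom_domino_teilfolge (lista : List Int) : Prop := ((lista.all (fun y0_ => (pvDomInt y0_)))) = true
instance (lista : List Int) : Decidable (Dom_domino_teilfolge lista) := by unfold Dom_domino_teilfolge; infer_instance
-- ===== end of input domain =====

-- B rebuilds the answer in two phases (break indices -> segment ranges -> max-by-length -> slice)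
-- instead of A's single stateful scan; objective: alternative decomposition, same value everywhere.

-- ===== PORT A =====
-- the for-loop over range(len(lista)-1) with state (mx, lg, i_start)
def dtLoop (lista : List Int) : List Int → Int × Int × Int → Int × Int × Int
  | [], st => st
  | i :: rest, (mx, lg, is) =>
    if PySem.Int.mod (PySem.List.pyGetD lista i 0) 10
        = PySem.Int.floordiv (PySem.List.pyGetD lista (i + 1) 0) 10 then
      dtLoop lista rest (mx, lg + 1, is)
    else if lg > mx then
      dtLoop lista rest (lg, 1, i - lg + 1)
    else
      dtLoop lista rest (mx, 1, is)

def domino_teilfolge (lista : List Int) : List Int :=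
  let st := dtLoop lista (PySem.List.pyRange 0 ((lista.length : Int) - 1) 1) (1, 1, 0)
  -- the final 'if lg > mx' after the loop
  let fin := if st.2.1 > st.1 then (st.2.1, (lista.length : Int) - st.2.1) else (st.1, st.2.2)
  PySem.List.slice lista (some fin.2) (some (fin.2 + fin.1))

-- ===== PORT B =====
def domino_teilfolge_alt (lista : List Int) : List Int :=
  let n : Int := lista.length
  -- starts = [0] + [i+1 for i in range(n-1) if lista[i] % 10 != lista[i+1] // 10]
  let starts : List Int := 0 :: (PySem.List.pyRange 0 (n - 1) 1).filterMap (fun i =>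
      if PySem.Int.mod (PySem.List.pyGetD lista i 0) 10
          ≠ PySem.Int.floordiv (PySem.List.pyGetD lista (i + 1) 0) 10
      then some (i + 1) else none)
  -- ranges = list(zip(starts, starts[1:] + [n]))
  let ranges := starts.zip (starts.tail ++ [n])
  -- s, e = max(ranges, key=lambda r: r[1] - r[0])  (ranges is never empty)
  match PySem.List.max? ranges (fun r => r.2 - r.1) with
  | some (s, e) => PySem.List.slice lista (some s) (some e)
  | none => []

-- ===== PRECONDITION & SPEC =====
def Spec_domino_teilfolge (lista : List Int) (out : List Int) : Prop := out = domino_teilfolge_alt lista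
instance (lista : List Int) (out : List Int) : Decidable (Spec_domino_teilfolge lista out) := by unfold Spec_domino_teilfolge; infer_instance

-- ===== CLAIM (what is proved, stated in full; the proofs are below) =====
def Claim_equal_domino_teilfolge : Prop := ∀ (lista : List Int), Dom_domino_teilfolge lista → Spec_domino_teilfolge lista (domino_teilfolge lista)

-- ===== LEMMAS AND PROOFS =====

-- segment ranges of the region whose current run starts at cs, gaps js still to scan, list end n
def dtSegs (lista : List Int) (n : Int) : List Int → Int → List (Int × Int)
  | [], cs => [(cs, n)]
  | j :: js, cs =>
    if PySem.Int.mod (PySem.List.pyGetD lista j 0) 10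
        = PySem.Int.floordiv (PySem.List.pyGetD lista (j + 1) 0) 10 then dtSegs lista n js cs
    else (cs, j + 1) :: dtSegs lista n js (j + 1)

-- break positions among the gaps js
def dtBreaks (lista : List Int) : List Int → List Int
  | [] => []
  | j :: js => if PySem.Int.mod (PySem.List.pyGetD lista j 0) 10
        = PySem.Int.floordiv (PySem.List.pyGetD lista (j + 1) 0) 10 then dtBreaks lista js else (j + 1) :: dtBreaks lista js

-- first-wins best (length, start) over the ranges
def dtBest : Int × Int → List (Int × Int) → Int × Int
  | b, [] => b
  | b, (s, e) :: rest => dtBest (if e - s > b.1 then (e - s, s) else b) rest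

def dtFin (n : Int) (st : Int × Int × Int) : Int × Int :=
  if st.2.1 > st.1 then (st.2.1, n - st.2.1) else (st.1, st.2.2)

lemma dtLoop_eq_best (lista : List Int) (n : Int) :
    ∀ (k : Nat) (pos mx lg is : Int), pos + k = n - 1 → 1 ≤ lg →
      dtFin n (dtLoop lista (PySem.List.pyRange pos (n - 1) 1) (mx, lg, is))
        = dtBest (mx, is) (dtSegs lista n (PySem.List.pyRange pos (n - 1) 1) (pos + 1 - lg)) := by
  intro k
  induction k with
  | zero =>
    intro pos mx lg is hk hlg
    rw [PySem.List.pyRange_one_eq_nil (by omega)]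
    simp only [dtLoop, dtSegs, dtBest, dtFin]
    split_ifs with h1 h2 h2 <;> simp_all <;> omega
  | succ k ih =>
    intro pos mx lg is hk hlg
    rw [PySem.List.pyRange_one_cons (by omega)]
    by_cases hf : PySem.Int.mod (PySem.List.pyGetD lista pos 0) 10
        = PySem.Int.floordiv (PySem.List.pyGetD lista (pos + 1) 0) 10
    · have h1 : PySem.Int.mod (PySem.List.pyGetD lista pos 0) 10
          = PySem.Int.floordiv (PySem.List.pyGetD lista (pos + 1) 0) 10 := hf
      simp only [dtLoop, dtSegs, if_pos h1, if_pos hf]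
      have := ih (pos + 1) mx (lg + 1) is (by omega) (by omega)
      have hcs : pos + 1 + 1 - (lg + 1) = pos + 1 - lg := by omega
      rw [hcs] at this
      exact this
    · have h1 : ¬ (PySem.Int.mod (PySem.List.pyGetD lista pos 0) 10
          = PySem.Int.floordiv (PySem.List.pyGetD lista (pos + 1) 0) 10) := hf
      simp only [dtLoop, dtSegs, if_neg h1, if_neg hf, dtBest]
      have hlen : pos + 1 - (pos + 1 - lg) = lg := by omega
      rw [hlen]
      by_cases hgt : lg > mx
      · rw [if_pos hgt, if_pos hgt]
        have := ih (pos + 1) lg 1 (pos + 1 - lg) (by omega) (by omega)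
        have hst : pos - lg + 1 = pos + 1 - lg := by omega
        have hcs : pos + 1 + 1 - 1 = pos + 1 := by omega
        rw [hcs] at this
        rw [hst]
        exact this
      · rw [if_neg hgt, if_neg hgt]
        have := ih (pos + 1) mx 1 is (by omega) (by omega)
        have hcs : pos + 1 + 1 - 1 = pos + 1 := by omega
        rw [hcs] at this
        exact this

lemma filterMap_eq_breaks (lista : List Int) :
    ∀ js : List Int,
      js.filterMap (fun i =>
        if PySem.Int.mod (PySem.List.pyGetD lista i 0) 10
            ≠ PySem.Int.floordiv (PySem.List.pyGetD lista (i + 1) 0) 10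
        then some (i + 1) else none) = dtBreaks lista js := by
  intro js
  induction js with
  | nil => rfl
  | cons j js ih =>
    by_cases hf : PySem.Int.mod (PySem.List.pyGetD lista j 0) 10
        = PySem.Int.floordiv (PySem.List.pyGetD lista (j + 1) 0) 10
    · have h1 : ¬ (PySem.Int.mod (PySem.List.pyGetD lista j 0) 10
          ≠ PySem.Int.floordiv (PySem.List.pyGetD lista (j + 1) 0) 10) := not_not_intro hf
      simp only [List.filterMap_cons, dtBreaks, if_neg h1, if_pos hf, ih]
    · have h1 : PySem.Int.mod (PySem.List.pyGetD lista j 0) 10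
          ≠ PySem.Int.floordiv (PySem.List.pyGetD lista (j + 1) 0) 10 := hf
      simp only [List.filterMap_cons, dtBreaks, if_pos h1, if_neg hf, ih]

lemma zip_breaks_eq_segs (lista : List Int) (n : Int) :
    ∀ (js : List Int) (cs : Int),
      (cs :: dtBreaks lista js).zip (dtBreaks lista js ++ [n]) = dtSegs lista n js cs := by
  intro js
  induction js with
  | nil => intro cs; rfl
  | cons j js ih =>
    intro cs
    by_cases hf : PySem.Int.mod (PySem.List.pyGetD lista j 0) 10
        = PySem.Int.floordiv (PySem.List.pyGetD lista (j + 1) 0) 10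
    · simp only [dtBreaks, dtSegs, if_pos hf, ih]
    · simp only [dtBreaks, dtSegs, if_neg hf, List.cons_append, List.zip_cons_cons, ih]

lemma segs_head (lista : List Int) (n : Int) :
    ∀ (js : List Int) (cs : Int), (∀ j ∈ js, cs ≤ j) → cs < n →
      ∃ e rest, dtSegs lista n js cs = (cs, e) :: rest ∧ cs < e := by
  intro js
  induction js with
  | nil => intro cs _ hn; exact ⟨n, [], rfl, hn⟩
  | cons j js ih =>
    intro cs hmem hn
    by_cases hf : PySem.Int.mod (PySem.List.pyGetD lista j 0) 10
        = PySem.Int.floordiv (PySem.List.pyGetD lista (j + 1) 0) 10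
    · simp only [dtSegs, if_pos hf]
      exact ih cs (fun x hx => hmem x (List.mem_cons_of_mem _ hx)) hn
    · simp only [dtSegs, if_neg hf]
      exact ⟨j + 1, _, rfl, by have := hmem j (List.mem_cons_self) ; omega⟩

lemma best_init (e : Int) (rest : List (Int × Int)) (he : 0 < e) :
    dtBest (1, 0) ((0, e) :: rest) = dtBest (e, 0) rest := by
  simp only [dtBest]
  split_ifs with h
  · norm_num
  · have : e = 1 := by omega
    subst this; rfl

lemma max?_cons_foldl (m : Int × Int) (rest : List (Int × Int)) :
    PySem.List.max? (m :: rest) (fun r : Int × Int => r.2 - r.1)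
      = some (rest.foldl (fun b x => if b.2 - b.1 < x.2 - x.1 then x else b) m) := by
  show List.foldl _ (some m) rest = _
  induction rest generalizing m with
  | nil => rfl
  | cons x rest ih =>
    simp only [List.foldl_cons]
    rw [show (if m.2 - m.1 < x.2 - x.1 then some x else some m)
          = some (if m.2 - m.1 < x.2 - x.1 then x else m) by split_ifs <;> rfl]
    exact ih _

lemma best_eq_foldl :
    ∀ (rest : List (Int × Int)) (s e : Int),
      dtBest (e - s, s) rest
        = ((rest.foldl (fun b x => if b.2 - b.1 < x.2 - x.1 then x else b) (s, e)).2
            - (rest.foldl (fun b x => if b.2 - b.1 < x.2 - x.1 then x else b) (s, e)).1,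
           (rest.foldl (fun b x => if b.2 - b.1 < x.2 - x.1 then x else b) (s, e)).1) := by
  intro rest
  induction rest with
  | nil => intro s e; rfl
  | cons x rest ih =>
    intro s e
    obtain ⟨s2, e2⟩ := x
    simp only [dtBest, List.foldl_cons]
    by_cases h : e - s < e2 - s2
    · rw [if_pos h, if_pos (show e2 - s2 > e - s from h)]
      exact ih s2 e2
    · rw [if_neg h, if_neg (show ¬ e2 - s2 > e - s from h)]
      exact ih s e

-- ===== VERDICT (by name: the statement is the Claim_ definition above) =====
theorem domino_teilfolge_spec : Claim_equal_domino_teilfolge := by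
  intro lista _
  show domino_teilfolge lista = domino_teilfolge_alt lista
  by_cases hnil : lista = []
  · subst hnil; rfl
  · have hn : 1 ≤ (lista.length : Int) := by
      have : lista.length ≠ 0 := fun h => hnil (List.length_eq_zero_iff.mp h)
      omega
    have hA : dtFin (lista.length : Int)
        (dtLoop lista (PySem.List.pyRange 0 ((lista.length : Int) - 1) 1) (1, 1, 0))
        = dtBest (1, 0)
            (dtSegs lista (lista.length : Int)
              (PySem.List.pyRange 0 ((lista.length : Int) - 1) 1) 0) := by
      have := dtLoop_eq_best lista (lista.length : Int)
        ((lista.length : Int) - 1).toNat 0 1 1 0 (by omega) (by omega)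
      simpa using this
    obtain ⟨e1, rest, hsegs, he1⟩ :=
      segs_head lista (lista.length : Int) (PySem.List.pyRange 0 ((lista.length : Int) - 1) 1) 0
        (fun j hj => ((PySem.List.mem_pyRange_one).mp hj).1) (by omega)
    have hranges :
        ((0 : Int) :: dtBreaks lista (PySem.List.pyRange 0 ((lista.length : Int) - 1) 1)).zip
            (dtBreaks lista (PySem.List.pyRange 0 ((lista.length : Int) - 1) 1)
              ++ [(lista.length : Int)])
          = dtSegs lista (lista.length : Int)
              (PySem.List.pyRange 0 ((lista.length : Int) - 1) 1) 0 :=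
      zip_breaks_eq_segs lista (lista.length : Int) _ 0
    have hbest : dtBest (1, 0)
        (dtSegs lista (lista.length : Int)
          (PySem.List.pyRange 0 ((lista.length : Int) - 1) 1) 0)
        = ((rest.foldl (fun b x => if b.2 - b.1 < x.2 - x.1 then x else b) ((0 : Int), e1)).2
            - (rest.foldl (fun b x => if b.2 - b.1 < x.2 - x.1 then x else b) ((0 : Int), e1)).1,
           (rest.foldl (fun b x => if b.2 - b.1 < x.2 - x.1 then x else b) ((0 : Int), e1)).1) := by
      rw [hsegs, best_init e1 rest he1]
      have := best_eq_foldl rest 0 e1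
      simpa using this
    have hmax : PySem.List.max?
        (dtSegs lista (lista.length : Int)
          (PySem.List.pyRange 0 ((lista.length : Int) - 1) 1) 0)
        (fun r : Int × Int => r.2 - r.1)
        = some (rest.foldl (fun b x => if b.2 - b.1 < x.2 - x.1 then x else b) ((0 : Int), e1)) := by
      rw [hsegs, max?_cons_foldl]
    simp only [domino_teilfolge, domino_teilfolge_alt, List.tail_cons]
    rw [filterMap_eq_breaks lista, hranges, hmax]
    have hfin : (if (dtLoop lista (PySem.List.pyRange 0 ((lista.length : Int) - 1) 1) (1, 1, 0)).2.1
            > (dtLoop lista (PySem.List.pyRange 0 ((lista.length : Int) - 1) 1) (1, 1, 0)).1 then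
          ((dtLoop lista (PySem.List.pyRange 0 ((lista.length : Int) - 1) 1) (1, 1, 0)).2.1,
            (lista.length : Int)
              - (dtLoop lista (PySem.List.pyRange 0 ((lista.length : Int) - 1) 1) (1, 1, 0)).2.1)
        else ((dtLoop lista (PySem.List.pyRange 0 ((lista.length : Int) - 1) 1) (1, 1, 0)).1,
          (dtLoop lista (PySem.List.pyRange 0 ((lista.length : Int) - 1) 1) (1, 1, 0)).2.2))
        = ((rest.foldl (fun b x => if b.2 - b.1 < x.2 - x.1 then x else b) ((0 : Int), e1)).2
            - (rest.foldl (fun b x => if b.2 - b.1 < x.2 - x.1 then x else b) ((0 : Int), e1)).1,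
           (rest.foldl (fun b x => if b.2 - b.1 < x.2 - x.1 then x else b) ((0 : Int), e1)).1) := by
      rw [← hbest, ← hA]; rfl
    rw [hfin]
    have harith :
        (rest.foldl (fun b x => if b.2 - b.1 < x.2 - x.1 then x else b) ((0 : Int), e1)).1
          + ((rest.foldl (fun b x => if b.2 - b.1 < x.2 - x.1 then x else b) ((0 : Int), e1)).2
            - (rest.foldl (fun b x => if b.2 - b.1 < x.2 - x.1 then x else b) ((0 : Int), e1)).1)
        = (rest.foldl (fun b x => if b.2 - b.1 < x.2 - x.1 then x else b) ((0 : Int), e1)).2 := by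
      ring
    rw [harith]
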